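-- pv_equiv track=rewrite | github.com/userdefault13/Aseprite-Mappie | src/tilemap_generator/map_gen_cli.py | continent_shoreline_cells
-- ===== SOURCE A (Python) =====
-- GRASS_CHAR = "G"
--
-- Point = tuple[int, int]
--
-- def _is_border_water(px: int, py: int, width: int, height: int, water_border_width: int) -> bool:
--     """True if (px,py) is out of bounds and treated as ocean border."""
--     if px < 0 or px >= width or py < 0 or py >= height:
--         return water_border_width > 0
--     return False
--
-- def continent_shoreline_cells(
--     grid: list[list[str]],
--     width: int,
--     height: int,
--     water_border_width: int = 0,
--     ocean_connected: set[Point] | None = None,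
--     exclude: set[Point] | None = None,
-- ) -> set[Point]:
--     """Grass adjacent to ocean (map edge or water connected to ocean via NESW). Sets B."""
--     exclude = exclude or set()
--     out: set[Point] = set()
--     for y in range(height):
--         for x in range(width):
--             if grid[y][x] != GRASS_CHAR or (x, y) in exclude:
--                 continue
--             # Adjacent to map edge (out-of-bounds ocean)
--             if (
--                 _is_border_water(x - 1, y, width, height, water_border_width)
--                 or _is_border_water(x + 1, y, width, height, water_border_width)
--                 or _is_border_water(x, y - 1, width, height, water_border_width)
--                 or _is_border_water(x, y + 1, width, height, water_border_width)
--             ):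
--                 out.add((x, y))
--                 continue
--             # Adjacent to ocean-connected water (water that reaches the ocean)
--             if ocean_connected:
--                 for nx, ny in [(x - 1, y), (x + 1, y), (x, y - 1), (x, y + 1)]:
--                     if 0 <= nx < width and 0 <= ny < height and (nx, ny) in ocean_connected:
--                         out.add((x, y))
--                         break
--     return out
-- ===== SOURCE B (Python) =====
-- GRASS_CHAR = "G"
--
--
-- def continent_shoreline_cells(
--     grid,
--     width,
--     height,
--     water_border_width=0,
--     ocean_connected=None,
--     exclude=None,
-- ):
--     """Precompute the dilation (NESW-neighborhood) of the in-bounds ocean cells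
--     once, then select shoreline grass in a single pass with one membership test
--     per cell (edge cells count when water_border_width > 0)."""
--     excl = exclude or set()
--     near = set()
--     for (ox, oy) in (ocean_connected or ()):
--         if 0 <= ox < width and 0 <= oy < height:
--             near.update(((ox - 1, oy), (ox + 1, oy), (ox, oy - 1), (ox, oy + 1)))
--     edge_is_water = water_border_width > 0
--     out = set()
--     for y in range(height):
--         for x in range(width):
--             if (
--                 grid[y][x] == GRASS_CHAR
--                 and (x, y) not in excl
--                 and (
--                     (edge_is_water and (x == 0 or x == width - 1 or y == 0 or y == height - 1))
--                     or (x, y) in near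
--                 )
--             ):
--                 out.add((x, y))
--     return out
-- ===== Notes on version B (the rewrite author's own statement) =====
-- stated objective: alternative
-- what changed: B replaces A's per-cell work (four border-water calls plus a neighbor loop scanning the ocean set for every grass cell) by precomputing the NESW dilation of the in-bounds ocean cells once, then a single pass that tests each cell with an arithmetic edge check and one membership test in the dilated set.
import Mathlib
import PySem

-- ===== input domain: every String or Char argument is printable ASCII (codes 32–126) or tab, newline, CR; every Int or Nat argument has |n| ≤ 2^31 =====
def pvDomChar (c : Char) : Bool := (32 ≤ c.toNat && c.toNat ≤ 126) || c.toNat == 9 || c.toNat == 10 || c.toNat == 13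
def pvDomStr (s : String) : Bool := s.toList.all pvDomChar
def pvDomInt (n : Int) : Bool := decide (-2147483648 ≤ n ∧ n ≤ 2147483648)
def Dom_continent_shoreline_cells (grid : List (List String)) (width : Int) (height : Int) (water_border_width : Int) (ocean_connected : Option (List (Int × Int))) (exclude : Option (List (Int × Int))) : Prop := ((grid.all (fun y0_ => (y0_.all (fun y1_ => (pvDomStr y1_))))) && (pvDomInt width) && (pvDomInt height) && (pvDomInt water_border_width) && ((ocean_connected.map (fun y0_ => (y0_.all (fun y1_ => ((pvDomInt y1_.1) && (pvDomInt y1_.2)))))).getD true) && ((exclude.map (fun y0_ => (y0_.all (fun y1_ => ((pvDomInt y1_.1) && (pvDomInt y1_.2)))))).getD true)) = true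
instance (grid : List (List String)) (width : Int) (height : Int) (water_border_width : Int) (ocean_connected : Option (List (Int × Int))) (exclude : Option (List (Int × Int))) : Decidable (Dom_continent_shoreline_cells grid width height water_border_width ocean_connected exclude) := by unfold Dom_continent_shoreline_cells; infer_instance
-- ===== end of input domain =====

-- B precomputes the NESW dilation of the in-bounds ocean cells once and then selects
-- shoreline grass in one pass with a single membership test per cell (objective: alternative).

-- ===== PORT A =====
def pvIsBorderWater (px py width height water_border_width : Int) : Bool :=
  if px < 0 ∨ width ≤ px ∨ py < 0 ∨ height ≤ py then decide (0 < water_border_width) else false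

def continent_shoreline_cells (grid : List (List String)) (width : Int) (height : Int) (water_border_width : Int) (ocean_connected : Option (List (Int × Int))) (exclude : Option (List (Int × Int))) : List (Int × Int) :=
  let excl : List (Int × Int) := exclude.getD []
  (PySem.List.pyRange 0 height 1).foldl (fun out y =>
    (PySem.List.pyRange 0 width 1).foldl (fun out x =>
      if PySem.List.pyGetD (PySem.List.pyGetD grid y []) x "" ≠ "G" ∨ (x, y) ∈ excl then out
      else if pvIsBorderWater (x - 1) y width height water_border_width
            || pvIsBorderWater (x + 1) y width height water_border_width
            || pvIsBorderWater x (y - 1) width height water_border_width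
            || pvIsBorderWater x (y + 1) width height water_border_width then
        PySem.Set.add out (x, y)
      else
        match ocean_connected with
        | none => out
        | some ocl =>
          if ocl.isEmpty then out
          else if ([(x - 1, y), (x + 1, y), (x, y - 1), (x, y + 1)] : List (Int × Int)).any
                 (fun p => decide (0 ≤ p.1 ∧ p.1 < width ∧ 0 ≤ p.2 ∧ p.2 < height ∧ p ∈ ocl)) then
            PySem.Set.add out (x, y)
          else out) out) []

-- ===== PORT B =====
def continent_shoreline_cells_alt (grid : List (List String)) (width : Int) (height : Int) (water_border_width : Int) (ocean_connected : Option (List (Int × Int))) (exclude : Option (List (Int × Int))) : List (Int × Int) :=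
  let excl : List (Int × Int) := exclude.getD []
  let near : PySem.Set (Int × Int) :=
    (ocean_connected.getD []).foldl (fun s p =>
      if 0 ≤ p.1 ∧ p.1 < width ∧ 0 ≤ p.2 ∧ p.2 < height then
        PySem.Set.update s [(p.1 - 1, p.2), (p.1 + 1, p.2), (p.1, p.2 - 1), (p.1, p.2 + 1)]
      else s) []
  let edgeIsWater : Bool := decide (0 < water_border_width)
  (PySem.List.pyRange 0 height 1).foldl (fun out y =>
    (PySem.List.pyRange 0 width 1).foldl (fun out x =>
      if PySem.List.pyGetD (PySem.List.pyGetD grid y []) x "" = "G" ∧ (x, y) ∉ excl ∧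
         ((edgeIsWater = true ∧ (x = 0 ∨ x = width - 1 ∨ y = 0 ∨ y = height - 1)) ∨ (x, y) ∈ near) then
        PySem.Set.add out (x, y)
      else out) out) []

-- ===== PRECONDITION & SPEC =====
-- Pre_ excludes exactly the inputs where A raises IndexError: grids with fewer than
-- height rows, or a scanned row shorter than width (only reached when width > 0).
def Pre_continent_shoreline_cells (grid : List (List String)) (width : Int) (height : Int) (water_border_width : Int) (ocean_connected : Option (List (Int × Int))) (exclude : Option (List (Int × Int))) : Prop :=
  0 < width → 0 < height →
    (height ≤ (grid.length : Int) ∧ ∀ row ∈ grid.take height.toNat, width ≤ (row.length : Int))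
instance (grid : List (List String)) (width : Int) (height : Int) (water_border_width : Int) (ocean_connected : Option (List (Int × Int))) (exclude : Option (List (Int × Int))) : Decidable (Pre_continent_shoreline_cells grid width height water_border_width ocean_connected exclude) := by unfold Pre_continent_shoreline_cells; infer_instance

def pvWitness_continent_shoreline_cells : List (List String) × Int × Int × Int × (Option (List (Int × Int))) × (Option (List (Int × Int))) :=
  ([["G", "G"], ["W", "G"]], 2, 2, 0, some [(0, 1)], some [(0, 0)])

def Spec_continent_shoreline_cells (grid : List (List String)) (width : Int) (height : Int) (water_border_width : Int) (ocean_connected : Option (List (Int × Int))) (exclude : Option (List (Int × Int))) (out : List (Int × Int)) : Prop := out = continent_shoreline_cells_alt grid width height water_border_width ocean_connected exclude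
instance (grid : List (List String)) (width : Int) (height : Int) (water_border_width : Int) (ocean_connected : Option (List (Int × Int))) (exclude : Option (List (Int × Int))) (out : List (Int × Int)) : Decidable (Spec_continent_shoreline_cells grid width height water_border_width ocean_connected exclude out) := by unfold Spec_continent_shoreline_cells; infer_instance

-- ===== CLAIM (what is proved, stated in full; the proofs are below) =====
def Claim_equal_continent_shoreline_cells : Prop := ∀ (grid : List (List String)) (width : Int) (height : Int) (water_border_width : Int) (ocean_connected : Option (List (Int × Int))) (exclude : Option (List (Int × Int))), Dom_continent_shoreline_cells grid width height water_border_width ocean_connected exclude → Pre_continent_shoreline_cells grid width height water_border_width ocean_connected exclude → Spec_continent_shoreline_cells grid width height water_border_width ocean_connected exclude (continent_shoreline_cells grid width height water_border_width ocean_connected exclude)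

-- ===== LEMMAS AND PROOFS =====

-- membership in B's dilation set
theorem mem_near_fold (width height : Int) (l : List (Int × Int)) (s : PySem.Set (Int × Int)) (q : Int × Int) :
    q ∈ l.foldl (fun s p =>
      if 0 ≤ p.1 ∧ p.1 < width ∧ 0 ≤ p.2 ∧ p.2 < height then
        PySem.Set.update s [(p.1 - 1, p.2), (p.1 + 1, p.2), (p.1, p.2 - 1), (p.1, p.2 + 1)]
      else s) s ↔
    q ∈ s ∨ ∃ p ∈ l, (0 ≤ p.1 ∧ p.1 < width ∧ 0 ≤ p.2 ∧ p.2 < height) ∧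
      (q = (p.1 - 1, p.2) ∨ q = (p.1 + 1, p.2) ∨ q = (p.1, p.2 - 1) ∨ q = (p.1, p.2 + 1)) := by
  induction l generalizing s with
  | nil => simp
  | cons p l ih =>
    simp only [List.foldl_cons]
    split_ifs with hp
    · rw [ih]
      simp only [PySem.Set.mem_update, List.mem_cons, List.not_mem_nil, or_false]
      constructor
      · rintro ((h | h) | ⟨r, hr, h1, h2⟩)
        · exact Or.inl h
        · exact Or.inr ⟨p, Or.inl rfl, hp, h⟩
        · exact Or.inr ⟨r, Or.inr hr, h1, h2⟩
      · rintro (h | ⟨r, (rfl | hr), h1, h2⟩)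
        · exact Or.inl (Or.inl h)
        · exact Or.inl (Or.inr h2)
        · exact Or.inr ⟨r, hr, h1, h2⟩
    · rw [ih]
      constructor
      · rintro (h | ⟨r, hr, h1, h2⟩)
        · exact Or.inl h
        · exact Or.inr ⟨r, List.mem_cons_of_mem _ hr, h1, h2⟩
      · rintro (h | ⟨r, hr, h1, h2⟩)
        · exact Or.inl h
        · rcases List.mem_cons.mp hr with rfl | hr'
          · exact absurd h1 hp
          · exact Or.inr ⟨r, hr', h1, h2⟩

-- the border disjunction of A, characterised for an in-bounds cell
theorem border_char (x y width height wbw : Int) (hx0 : 0 ≤ x) (hx1 : x < width) (hy0 : 0 ≤ y) (hy1 : y < height) :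
    (pvIsBorderWater (x - 1) y width height wbw
      || pvIsBorderWater (x + 1) y width height wbw
      || pvIsBorderWater x (y - 1) width height wbw
      || pvIsBorderWater x (y + 1) width height wbw) = true ↔
    0 < wbw ∧ (x = 0 ∨ x = width - 1 ∨ y = 0 ∨ y = height - 1) := by
  simp only [pvIsBorderWater, Bool.or_eq_true]
  split_ifs <;> simp <;> omega

theorem continent_shoreline_cells_eq (grid : List (List String)) (width height wbw : Int)
    (oc ex : Option (List (Int × Int))) :
    continent_shoreline_cells grid width height wbw oc ex
      = continent_shoreline_cells_alt grid width height wbw oc ex := by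
  unfold continent_shoreline_cells continent_shoreline_cells_alt
  refine PySem.List.foldl_congr_mem _ _ _ _ (fun out y hy => ?_)
  refine PySem.List.foldl_congr_mem _ _ _ _ (fun out2 x hx => ?_)
  rw [PySem.List.mem_pyRange_one] at hy hx
  -- per-cell agreement
  by_cases hg : PySem.List.pyGetD (PySem.List.pyGetD grid y []) x "" = "G"
  · by_cases he : (x, y) ∈ ex.getD []
    · simp [hg, he]
    · rw [if_neg (by simp [hg, he])]
      by_cases hb : 0 < wbw ∧ (x = 0 ∨ x = width - 1 ∨ y = 0 ∨ y = height - 1)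
      · rw [if_pos ((border_char x y width height wbw hx.1 hx.2 hy.1 hy.2).mpr hb),
          if_pos ⟨hg, he, Or.inl ⟨by simpa using hb.1, hb.2⟩⟩]
      · rw [if_neg (by
          intro h
          exact hb ((border_char x y width height wbw hx.1 hx.2 hy.1 hy.2).mp h))]
        have hnear : ∀ l : List (Int × Int), ((x, y) ∈ l.foldl (fun s p =>
            if 0 ≤ p.1 ∧ p.1 < width ∧ 0 ≤ p.2 ∧ p.2 < height then
              PySem.Set.update s [(p.1 - 1, p.2), (p.1 + 1, p.2), (p.1, p.2 - 1), (p.1, p.2 + 1)]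
            else s) [] ↔
            ∃ p ∈ l, 0 ≤ p.1 ∧ p.1 < width ∧ 0 ≤ p.2 ∧ p.2 < height ∧
              (p = (x - 1, y) ∨ p = (x + 1, y) ∨ p = (x, y - 1) ∨ p = (x, y + 1))) := by
          intro l
          rw [mem_near_fold]
          simp only [List.not_mem_nil, false_or]
          constructor
          · rintro ⟨p, hp, h1, h2⟩
            refine ⟨p, hp, h1.1, h1.2.1, h1.2.2.1, h1.2.2.2, ?_⟩
            obtain ⟨px, py⟩ := p
            rcases h2 with h | h | h | h <;> rw [Prod.ext_iff] at h <;> simp only at h <;>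
              [exact Or.inr (Or.inl (by rw [Prod.ext_iff]; constructor <;> simp <;> omega));
               exact Or.inl (by rw [Prod.ext_iff]; constructor <;> simp <;> omega);
               exact Or.inr (Or.inr (Or.inr (by rw [Prod.ext_iff]; constructor <;> simp <;> omega)));
               exact Or.inr (Or.inr (Or.inl (by rw [Prod.ext_iff]; constructor <;> simp <;> omega)))]
          · rintro ⟨p, hp, h1, h2, h3, h4, h5⟩
            refine ⟨p, hp, ⟨h1, h2, h3, h4⟩, ?_⟩
            rcases h5 with h | h | h | h <;> subst h <;> simp only [] <;>
              [exact Or.inr (Or.inl (by rw [Prod.ext_iff]; constructor <;> simp));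
               exact Or.inl (by rw [Prod.ext_iff]; constructor <;> simp);
               exact Or.inr (Or.inr (Or.inr (by rw [Prod.ext_iff]; constructor <;> simp)));
               exact Or.inr (Or.inr (Or.inl (by rw [Prod.ext_iff]; constructor <;> simp)))]
        rcases oc with _ | ocl
        · -- ocean_connected is None
          refine Eq.symm (if_neg ?_)
          rintro ⟨-, -, h | h⟩
          · exact hb ⟨by simpa using h.1, h.2⟩
          · simp only [Option.getD_none, List.foldl_nil] at h
            exact absurd h List.not_mem_nil
        · -- ocean_connected = some ocl
          simp only [Option.getD_some]
          by_cases hany : ∃ p ∈ ocl, 0 ≤ p.1 ∧ p.1 < width ∧ 0 ≤ p.2 ∧ p.2 < height ∧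
              (p = (x - 1, y) ∨ p = (x + 1, y) ∨ p = (x, y - 1) ∨ p = (x, y + 1))
          · have hne : ocl.isEmpty = false := by
              obtain ⟨p, hp, -⟩ := hany
              cases ocl with
              | nil => exact absurd hp List.not_mem_nil
              | cons a l => rfl
            rw [if_neg (by simp [hne]), if_pos (by
                simp only [List.any_eq_true, decide_eq_true_eq]
                obtain ⟨p, hp, h1, h2, h3, h4, h5⟩ := hany
                rcases h5 with h | h | h | h <;> subst h <;>
                  first
                  | exact ⟨(x - 1, y), by simp, h1, h2, h3, h4, hp⟩
                  | exact ⟨(x + 1, y), by simp, h1, h2, h3, h4, hp⟩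
                  | exact ⟨(x, y - 1), by simp, h1, h2, h3, h4, hp⟩
                  | exact ⟨(x, y + 1), by simp, h1, h2, h3, h4, hp⟩),
              if_pos ⟨hg, he, Or.inr ((hnear ocl).mpr hany)⟩]
          · refine Eq.trans ?_ (Eq.symm (if_neg ?_))
            · split_ifs with h1 h2
              · rfl
              · exfalso
                simp only [List.any_eq_true, decide_eq_true_eq] at h2
                obtain ⟨p, hp, c1, c2, c3, c4, c5⟩ := h2
                refine hany ⟨p, c5, c1, c2, c3, c4, ?_⟩
                simp only [List.mem_cons, List.not_mem_nil, or_false] at hp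
                tauto
              · rfl
            · rintro ⟨-, -, h | h⟩
              · exact hb ⟨by simpa using h.1, h.2⟩
              · exact hany ((hnear ocl).mp h)
  · rw [if_pos (Or.inl hg), if_neg (fun h => hg h.1)]

-- ===== VERDICT (by name: the statement is the Claim_ definition above) =====
theorem continent_shoreline_cells_spec : Claim_equal_continent_shoreline_cells := by
  intro grid width height wbw oc ex _ _
  exact continent_shoreline_cells_eq grid width height wbw oc ex
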